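-- pv_equiv track=rewrite | github.com/Iain530/advent-of-code | 2023/18/lavaduct_lagoon.py | search_basin
-- ===== SOURCE A (Python) =====
-- from collections import deque
--
-- def adjacent_coords(grid, i, j):
--     res = []
--     if i > 0:
--         res.append((i - 1, j))
--     if i < len(grid) - 1:
--         res.append((i + 1, j))
--     if j > 0:
--         res.append((i, j - 1))
--     if j < len(grid[i]) - 1:
--         res.append((i, j + 1))
--     return res
--
-- def search_basin(grid, i, j):
--     queue = deque()
--     basin = set()
--
--     queue.append((i, j))
--     while queue:
--         i, j = queue.pop()
--         if (i, j) in basin: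
--             continue
--
--         if grid[i][j] == '#':
--             continue
--
--         basin.add((i, j))
--
--         for adj_i, adj_j in adjacent_coords(grid, i, j):
--             if (adj_i, adj_j) not in basin:
--                 queue.append((adj_i, adj_j))
--
--     return basin
-- ===== SOURCE B (Python) =====
-- def search_basin(grid, i, j):
--     # Recursive depth-first flood fill: a nested helper fills the shared basin
--     # set directly, recursing on the in-bounds neighbours; no explicit queue.
--     # (Note: very large open regions can exceed Python's recursion limit,
--     # where A's explicit-queue version would still return.)
--     basin = set()
--
--     def fill(ci, cj):
--         if (ci, cj) in basin:
--             return
--         if grid[ci][cj] == '#':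
--             return
--         basin.add((ci, cj))
--         if cj < len(grid[ci]) - 1:
--             fill(ci, cj + 1)
--         if cj > 0:
--             fill(ci, cj - 1)
--         if ci < len(grid) - 1:
--             fill(ci + 1, cj)
--         if ci > 0:
--             fill(ci - 1, cj)
--
--     fill(i, j)
--     return basin
-- ===== Notes on version B (the rewrite author's own statement) =====
-- stated objective: alternative
-- what changed: A is an iterative flood fill driven by an explicit deque used as a stack (neighbours filtered at push time and re-checked at pop time); B is a recursive depth-first fill: a nested helper checks membership/wall at entry, adds the cell to the shared set, and recurses on the in-bounds neighbours, with no queue at all. Pre_ excludes non-rectangular (ragged) grids except when the start cell is a wall: on ragged grids A raises IndexError as soon as the flood steps past a shorter row, and whether it does depends on the whole search, which is not a closed-form condition.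
-- outside the precondition, e.g. on search_basin(['#.#', '##'], 0, 1): A returns {(0, 1)}, B returns {(0, 1)}
import Mathlib
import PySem

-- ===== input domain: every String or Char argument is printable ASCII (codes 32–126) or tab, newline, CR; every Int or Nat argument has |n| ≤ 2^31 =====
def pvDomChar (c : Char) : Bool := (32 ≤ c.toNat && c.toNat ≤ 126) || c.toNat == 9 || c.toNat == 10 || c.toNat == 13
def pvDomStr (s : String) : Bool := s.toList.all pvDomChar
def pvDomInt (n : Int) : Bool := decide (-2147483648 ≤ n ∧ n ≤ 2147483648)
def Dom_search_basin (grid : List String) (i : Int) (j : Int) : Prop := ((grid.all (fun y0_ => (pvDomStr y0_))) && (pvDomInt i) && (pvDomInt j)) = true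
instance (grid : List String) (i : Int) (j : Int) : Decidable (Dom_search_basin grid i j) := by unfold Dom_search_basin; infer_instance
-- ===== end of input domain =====

-- B replaces A's explicit-stack flood fill by a recursive depth-first fill (a nested helper
-- recursing on the in-bounds neighbours); objective: alternative decomposition, same cost.

-- Termination infrastructure, needed by the ports' `decreasing_by` clauses / fuel bound.
-- pvCellsOf grid: every (i, j) that Python can index without raising (negative wraps included).
def pvCellsOf (grid : List String) : List (Int × Int) :=
  (PySem.List.pyRange (-(grid.length : Int)) grid.length 1).flatMap (fun i =>
    match PySem.List.pyGet? grid i with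
    | none => []
    | some row =>
      (PySem.List.pyRange (-(row.toList.length : Int)) row.toList.length 1).map (fun j => (i, j)))

-- number of indexable cells not yet in the basin: the loop measure / recursion fuel
def pvFree (grid : List String) (b : List (Int × Int)) : Nat :=
  (pvCellsOf grid).countP (fun x => !(decide (x ∈ b)))

theorem pvCountP_lt {α : Type} (l : List α) (p q : α → Bool)
    (h : ∀ x, q x = true → p x = true) (c : α) (hc : c ∈ l)
    (hp : p c = true) (hq : q c = false) : l.countP q < l.countP p := by
  induction l with
  | nil => cases hc
  | cons y ys ih =>
    rcases List.mem_cons.1 hc with rfl | hmem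
    · have : ys.countP q ≤ ys.countP p := List.countP_mono_left (fun x _ hx => h x hx)
      simp [hp, hq]
      omega
    · have := ih hmem
      simp only [List.countP_cons]
      by_cases hqy : q y = true
      · simp [hqy, h y hqy]; omega
      · simp only [Bool.not_eq_true] at hqy
        simp [hqy]; split <;> omega

theorem pvMem_cells (grid : List String) (c : Int × Int) (row : String) (ch : Char)
    (hrow : PySem.List.pyGet? grid c.1 = some row)
    (hch : PySem.Str.pyGet? row c.2 = some ch) : c ∈ pvCellsOf grid := by
  have hir : PySem.Raise.InRange grid.length c.1 := by
    by_contra hn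
    rw [← PySem.List.pyGet?_eq_none_iff grid c.1] at hn
    simp [hn] at hrow
  have hib : -(grid.length : Int) ≤ c.1 ∧ c.1 < grid.length := by
    unfold PySem.Raise.InRange at hir; exact hir
  have hch' : PySem.List.pyGet? row.toList c.2 = some ch := by
    simpa using hch
  have hjr : PySem.Raise.InRange row.toList.length c.2 := by
    by_contra hn
    rw [← PySem.List.pyGet?_eq_none_iff row.toList c.2] at hn
    simp [hn] at hch'
  have hjb : -(row.toList.length : Int) ≤ c.2 ∧ c.2 < row.toList.length := by
    unfold PySem.Raise.InRange at hjr; exact hjr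
  unfold pvCellsOf
  refine List.mem_flatMap.2 ⟨c.1, ?_, ?_⟩
  · rw [PySem.List.mem_pyRange_one]; omega
  · rw [hrow]
    refine List.mem_map.2 ⟨c.2, ?_, rfl⟩
    rw [PySem.List.mem_pyRange_one]; omega

theorem pvFree_add_lt (grid : List String) (b : List (Int × Int)) (c : Int × Int)
    (row : String) (ch : Char)
    (hrow : PySem.List.pyGet? grid c.1 = some row)
    (hch : PySem.Str.pyGet? row c.2 = some ch)
    (hc : c ∉ b) : pvFree grid (PySem.Set.add b c) < pvFree grid b := by
  refine pvCountP_lt _ _ _ ?_ c (pvMem_cells grid c row ch hrow hch) (by simp [hc]) ?_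
  · intro x hx
    simp only [Bool.not_eq_true', decide_eq_false_iff_not] at hx ⊢
    intro hmem
    exact hx (by simp [PySem.Set.mem_add, hmem])
  · simp [PySem.Set.mem_add]

-- ===== PORT A =====
def adjacent_coords (grid : List String) (i : Int) (j : Int) : List (Int × Int) :=
  let res : List (Int × Int) := []
  let res := if i > 0 then res ++ [(i - 1, j)] else res
  let res := if i < PySem.List.len grid - 1 then res ++ [(i + 1, j)] else res
  let res := if j > 0 then res ++ [(i, j - 1)] else res
  -- len(grid[i]); grid[i] is indexable whenever A calls this (0 default unreachable under Pre_)
  let res := if j < ((PySem.List.pyGet? grid i).elim 0 PySem.Str.len) - 1 then res ++ [(i, j + 1)] else res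
  res

def pvLoopA (grid : List String) (basin : PySem.Set (Int × Int)) (stack : List (Int × Int)) :
    List (Int × Int) :=
  match stack with
  | [] => basin
  | c :: rest =>
    if c ∈ basin then pvLoopA grid basin rest
    else
      match hrow : PySem.List.pyGet? grid c.1 with
      | none => basin   -- Python: grid[i] raises IndexError here (excluded by Pre_)
      | some row =>
        match hch : PySem.Str.pyGet? row c.2 with
        | none => basin -- Python: grid[i][j] raises IndexError here (excluded by Pre_)
        | some ch =>
          if ch = '#' then pvLoopA grid basin rest
          else
            -- deque used as a stack (append/pop at the right); list held top-first, so the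
            -- four appends u,d,l,r (minus the already-visited ones) arrive reversed on top
            pvLoopA grid (PySem.Set.add basin c)
              (((adjacent_coords grid c.1 c.2).filter
                  (fun a => !(decide (a ∈ PySem.Set.add basin c)))).reverse ++ rest)
  termination_by (pvFree grid basin, stack.length)
  decreasing_by
  · exact Prod.Lex.right _ (by simp)
  · exact Prod.Lex.right _ (by simp)
  · exact Prod.Lex.left _ _ (pvFree_add_lt grid basin c row ch hrow hch (by assumption))

def search_basin (grid : List String) (i : Int) (j : Int) : List (Int × Int) :=
  pvLoopA grid PySem.Set.empty [(i, j)]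

-- ===== PORT B =====
-- fill(ci, cj) of Source B: recursion totalised with fuel; one fuel unit per call, and
-- pvFree grid Set.empty + 1 units suffice (every deepening call adds a fresh cell —
-- proved below, pvVisit_fuel/pvFill_eq_visit), so the fuel guard is unreachable.
def pvFill (grid : List String) : Nat → PySem.Set (Int × Int) → Int × Int → PySem.Set (Int × Int)
  | 0, b, _ => b
  | f + 1, b, c =>
    if c ∈ b then b
    else
      match PySem.List.pyGet? grid c.1 with
      | none => b   -- Python: grid[ci] raises IndexError here (excluded by Pre_)
      | some row =>
        match PySem.Str.pyGet? row c.2 with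
        | none => b -- Python: grid[ci][cj] raises IndexError here (excluded by Pre_)
        | some ch =>
          if ch = '#' then b
          else
            let b0 := PySem.Set.add b c
            let b1 := if c.2 < PySem.Str.len row - 1 then pvFill grid f b0 (c.1, c.2 + 1) else b0
            let b2 := if c.2 > 0 then pvFill grid f b1 (c.1, c.2 - 1) else b1
            let b3 := if c.1 < PySem.List.len grid - 1 then pvFill grid f b2 (c.1 + 1, c.2) else b2
            if c.1 > 0 then pvFill grid f b3 (c.1 - 1, c.2) else b3

def search_basin_alt (grid : List String) (i : Int) (j : Int) : List (Int × Int) :=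
  pvFill grid (pvFree grid PySem.Set.empty + 1) PySem.Set.empty (i, j)

-- ===== PRECONDITION & SPEC =====
-- Pre_ admits any input whose start cell is a wall (A returns the empty set at once) and any
-- rectangular grid with the start index in Python's (negative-wrap) range; it excludes the inputs
-- where A raises IndexError, and with them ragged grids with a non-wall start, where whether A
-- raises (stepping past a shorter row) or returns depends on the whole search.
def Pre_search_basin (grid : List String) (i : Int) (j : Int) : Prop :=
  ((PySem.List.pyGet? grid i).bind (fun row => PySem.Str.pyGet? row j) = some '#')
  ∨ ((∀ r ∈ grid, r.toList.length = (grid.headD "").toList.length)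
      ∧ -(grid.length : Int) ≤ i ∧ i < grid.length
      ∧ -((grid.headD "").toList.length : Int) ≤ j ∧ j < (grid.headD "").toList.length)
instance (grid : List String) (i : Int) (j : Int) : Decidable (Pre_search_basin grid i j) := by
  unfold Pre_search_basin; infer_instance

def pvWitness_search_basin : List String × Int × Int := (["..", ".#"], 0, 0)

def Spec_search_basin (grid : List String) (i : Int) (j : Int) (out : List (Int × Int)) : Prop :=
  out = search_basin_alt grid i j
instance (grid : List String) (i : Int) (j : Int) (out : List (Int × Int)) :
    Decidable (Spec_search_basin grid i j out) := by unfold Spec_search_basin; infer_instance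

-- ===== CLAIM (what is proved, stated in full; the proofs are below) =====
def Claim_equal_search_basin : Prop :=
  ∀ (grid : List String) (i : Int) (j : Int), Dom_search_basin grid i j →
    Pre_search_basin grid i j → Spec_search_basin grid i j (search_basin grid i j)

-- ===== LEMMAS AND PROOFS =====

-- proof-side reference: the same fueled recursive visit, with the four recursions packed
-- into a fold over the pending-neighbour list, so folds over stacks can be reasoned about
def pvPend (grid : List String) (c : Int × Int) : List (Int × Int) :=
  (if c.2 < ((PySem.List.pyGet? grid c.1).elim 0 PySem.Str.len) - 1 then [(c.1, c.2 + 1)] else [])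
  ++ (if c.2 > 0 then [(c.1, c.2 - 1)] else [])
  ++ (if c.1 < PySem.List.len grid - 1 then [(c.1 + 1, c.2)] else [])
  ++ (if c.1 > 0 then [(c.1 - 1, c.2)] else [])

def pvVisit (grid : List String) : Nat → PySem.Set (Int × Int) → (Int × Int) → PySem.Set (Int × Int)
  | 0, b, _ => b
  | f + 1, b, c =>
    if c ∈ b then b
    else
      match PySem.List.pyGet? grid c.1 with
      | none => b
      | some row =>
        match PySem.Str.pyGet? row c.2 with
        | none => b
        | some ch =>
          if ch = '#' then b
          else (pvPend grid c).foldl (pvVisit grid f) (PySem.Set.add b c)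

theorem pvFill_eq_visit (grid : List String) :
    ∀ (f : Nat) (b : PySem.Set (Int × Int)) (c : Int × Int),
      pvFill grid f b c = pvVisit grid f b c := by
  intro f
  induction f with
  | zero => intro b c; rfl
  | succ f ih =>
    intro b c
    simp only [pvFill, pvVisit]
    split
    · rfl
    · split
      · rfl
      · rename_i row hrow
        split
        · rfl
        · split
          · rfl
          · unfold pvPend
            rw [hrow]
            simp only [Option.elim, List.foldl_append]
            split_ifs <;> simp [ih]

theorem pvVisit_of_mem (grid : List String) (f : Nat) (b : PySem.Set (Int × Int))
    (c : Int × Int) (h : c ∈ b) : pvVisit grid f b c = b := by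
  cases f <;> simp [pvVisit, h]

theorem pvVisit_mono (grid : List String) :
    ∀ f : Nat, (∀ b c, b ⊆ pvVisit grid f b c) ∧
      (∀ (l : List (Int × Int)) b, b ⊆ l.foldl (pvVisit grid f) b) := by
  intro f
  induction f with
  | zero =>
    constructor
    · intro b c; simp [pvVisit]
    · intro l
      induction l with
      | nil => simp
      | cons x xs ih => intro b; simp only [List.foldl_cons, pvVisit]; exact ih b
  | succ f ih =>
    have hsingle : ∀ b c, b ⊆ pvVisit grid (f + 1) b c := by
      intro b c
      simp only [pvVisit]
      split
      · exact fun _ h => h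
      · split
        · exact fun _ h => h
        · split
          · exact fun _ h => h
          · split
            · exact fun _ h => h
            · intro x hx
              exact ih.2 (pvPend grid c) (PySem.Set.add b c)
                (by simp [PySem.Set.mem_add]; exact Or.inl hx)
    refine ⟨hsingle, ?_⟩
    intro l
    induction l with
    | nil => simp
    | cons x xs ihl =>
      intro b
      exact fun y hy => ihl (pvVisit grid (f + 1) b x) (hsingle b x hy)

theorem pvFree_le_of_subset (grid : List String) (b b' : PySem.Set (Int × Int))
    (h : b ⊆ b') : pvFree grid b' ≤ pvFree grid b := by
  unfold pvFree
  refine List.countP_mono_left ?_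
  intro x _ hx
  simp only [Bool.not_eq_true', decide_eq_false_iff_not] at hx ⊢
  exact fun hm => hx (h hm)

theorem pvVisit_fuel (grid : List String) :
    ∀ f : Nat, ∀ f' b c, pvFree grid b < f → pvFree grid b < f' →
      pvVisit grid f b c = pvVisit grid f' b c := by
  intro f
  induction f using Nat.strong_induction_on with
  | _ f IH =>
    intro f' b c hf hf'
    match f, f' with
    | f + 1, f' + 1 =>
      simp only [pvVisit]
      split
      · rfl
      · rename_i hmem
        split
        · rfl
        · rename_i row hrow
          split
          · rfl
          · rename_i ch hch
            split
            · rfl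
            · have hfree : pvFree grid (PySem.Set.add b c) < pvFree grid b :=
                pvFree_add_lt grid b c row ch hrow hch hmem
              have key : ∀ (l : List (Int × Int)) b'',
                  pvFree grid b'' < f → pvFree grid b'' < f' →
                  l.foldl (pvVisit grid f) b'' = l.foldl (pvVisit grid f') b'' := by
                intro l
                induction l with
                | nil => intro b'' _ _; rfl
                | cons x xs ihl =>
                  intro b'' h1 h2
                  simp only [List.foldl_cons]
                  rw [IH f (by omega) f' b'' x h1 h2]
                  refine ihl (pvVisit grid f' b'' x) ?_ ?_
                  · calc pvFree grid (pvVisit grid f' b'' x) ≤ pvFree grid b'' :=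
                          pvFree_le_of_subset grid _ _ ((pvVisit_mono grid f').1 b'' x)
                      _ < f := h1
                  · calc pvFree grid (pvVisit grid f' b'' x) ≤ pvFree grid b'' :=
                          pvFree_le_of_subset grid _ _ ((pvVisit_mono grid f').1 b'' x)
                      _ < f' := h2
              exact key (pvPend grid c) (PySem.Set.add b c) (by omega) (by omega)

-- foldl with pvVisit ignores elements already in a subset of the accumulator
theorem pvFoldl_filter (grid : List String) (f : Nat) :
    ∀ (l : List (Int × Int)) (b b₀ : PySem.Set (Int × Int)), b₀ ⊆ b →
      (l.filter (fun x => !(decide (x ∈ b₀)))).foldl (pvVisit grid f) b =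
        l.foldl (pvVisit grid f) b := by
  intro l
  induction l with
  | nil => intro b b₀ _; rfl
  | cons x xs ih =>
    intro b b₀ hsub
    by_cases hx : x ∈ b₀
    · rw [List.filter_cons_of_neg (by simp [hx]), List.foldl_cons,
        pvVisit_of_mem grid f b x (hsub hx)]
      exact ih b b₀ hsub
    · rw [List.filter_cons_of_pos (by simp [hx]), List.foldl_cons, List.foldl_cons]
      exact ih (pvVisit grid f b x) b₀
        (fun y hy => (pvVisit_mono grid f).1 b x (hsub hy))

-- geometry: valid cells under a rectangular grid
def pvOK (grid : List String) (c : Int × Int) : Prop :=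
  -(grid.length : Int) ≤ c.1 ∧ c.1 < grid.length
  ∧ -((grid.headD "").toList.length : Int) ≤ c.2 ∧ c.2 < (grid.headD "").toList.length

theorem pvOK_get (grid : List String)
    (hrect : ∀ r ∈ grid, r.toList.length = (grid.headD "").toList.length)
    (c : Int × Int) (hok : pvOK grid c) :
    ∃ row ch, PySem.List.pyGet? grid c.1 = some row
      ∧ row.toList.length = (grid.headD "").toList.length
      ∧ PySem.Str.pyGet? row c.2 = some ch := by
  obtain ⟨h1, h2, h3, h4⟩ := hok
  have hir : PySem.Raise.InRange grid.length c.1 := by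
    unfold PySem.Raise.InRange; exact ⟨h1, h2⟩
  obtain ⟨row, hrow⟩ : ∃ row, PySem.List.pyGet? grid c.1 = some row := by
    rcases h : PySem.List.pyGet? grid c.1 with _ | row
    · exact absurd ((PySem.List.pyGet?_eq_none_iff grid c.1).1 h) (by simpa using hir)
    · exact ⟨row, rfl⟩
  have hlen : row.toList.length = (grid.headD "").toList.length :=
    hrect row (PySem.List.mem_of_pyGet?_eq_some grid hrow)
  obtain ⟨ch, hch⟩ : ∃ ch, PySem.List.pyGet? row.toList c.2 = some ch := by
    rcases h : PySem.List.pyGet? row.toList c.2 with _ | ch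
    · have hn := (PySem.List.pyGet?_eq_none_iff row.toList c.2).1 h
      refine absurd ?_ hn
      unfold PySem.Raise.InRange
      exact ⟨by omega, by omega⟩
    · exact ⟨ch, rfl⟩
  exact ⟨row, ch, hrow, hlen, by simpa using hch⟩

theorem pvPend_ok (grid : List String)
    (hrect : ∀ r ∈ grid, r.toList.length = (grid.headD "").toList.length)
    (c : Int × Int) (hok : pvOK grid c) (row : String)
    (hrow : PySem.List.pyGet? grid c.1 = some row) :
    ∀ x ∈ pvPend grid c, pvOK grid x := by
  obtain ⟨h1, h2, h3, h4⟩ := hok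
  have hlen : row.toList.length = (grid.headD "").toList.length :=
    hrect row (PySem.List.mem_of_pyGet?_eq_some grid hrow)
  intro x hx
  unfold pvPend at hx
  rw [hrow] at hx
  simp only [Option.elim] at hx
  have hl : PySem.Str.len row = (row.toList.length : Int) := by simp
  have hg : PySem.List.len grid = (grid.length : Int) := by simp
  simp only [hl, hg] at hx
  rcases List.mem_append.1 hx with hx | hx
  · rcases List.mem_append.1 hx with hx | hx
    · rcases List.mem_append.1 hx with hx | hx
      · split at hx
        · rename_i hc; simp at hx; subst hx; exact ⟨by omega, by omega, by omega, by omega⟩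
        · simp at hx
      · split at hx
        · rename_i hc; simp at hx; subst hx; exact ⟨by omega, by omega, by omega, by omega⟩
        · simp at hx
    · split at hx
      · rename_i hc; simp at hx; subst hx; exact ⟨by omega, by omega, by omega, by omega⟩
      · simp at hx
  · split at hx
    · rename_i hc; simp at hx; subst hx; exact ⟨by omega, by omega, by omega, by omega⟩
    · simp at hx

theorem pvVisit_wall (grid : List String) (f : Nat) (b : PySem.Set (Int × Int))
    (c : Int × Int) (row : String)
    (hrow : PySem.List.pyGet? grid c.1 = some row)
    (hch : PySem.Str.pyGet? row c.2 = some '#') :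
    pvVisit grid f b c = b := by
  have hch' : PySem.List.pyGet? row.toList c.2 = some '#' := by simpa using hch
  cases f with
  | zero => rfl
  | succ g => simp [pvVisit, hrow, hch']

theorem pvFoldl_fuel (grid : List String) (f f' : Nat) :
    ∀ (l : List (Int × Int)) (b : PySem.Set (Int × Int)),
      pvFree grid b < f → pvFree grid b < f' →
      l.foldl (pvVisit grid f) b = l.foldl (pvVisit grid f') b := by
  intro l
  induction l with
  | nil => intro b _ _; rfl
  | cons x xs ih =>
    intro b h1 h2
    simp only [List.foldl_cons]
    rw [pvVisit_fuel grid f f' b x h1 h2]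
    refine ih (pvVisit grid f' b x) ?_ ?_
    · exact lt_of_le_of_lt (pvFree_le_of_subset grid _ _ ((pvVisit_mono grid f').1 b x)) h1
    · exact lt_of_le_of_lt (pvFree_le_of_subset grid _ _ ((pvVisit_mono grid f').1 b x)) h2

theorem pvVisit_step (grid : List String) (f : Nat) (b : PySem.Set (Int × Int))
    (c : Int × Int) (row : String) (ch : Char)
    (hmem : c ∉ b)
    (hrow : PySem.List.pyGet? grid c.1 = some row)
    (hch : PySem.Str.pyGet? row c.2 = some ch)
    (hwall : ¬ ch = '#') (hf : pvFree grid b < f) :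
    pvVisit grid f b c = (pvPend grid c).foldl (pvVisit grid f) (PySem.Set.add b c) := by
  have hch' : PySem.List.pyGet? row.toList c.2 = some ch := by simpa using hch
  cases f with
  | zero => omega
  | succ g =>
    have hstep : pvVisit grid (g + 1) b c =
        (pvPend grid c).foldl (pvVisit grid g) (PySem.Set.add b c) := by
      simp [pvVisit, hrow, hch', hmem, hwall]
    rw [hstep]
    have hfree : pvFree grid (PySem.Set.add b c) < pvFree grid b :=
      pvFree_add_lt grid b c row ch hrow hch hmem
    exact pvFoldl_fuel grid g (g + 1) (pvPend grid c) (PySem.Set.add b c) (by omega) (by omega)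

theorem pvAdj_reverse (grid : List String) (i j : Int) :
    (adjacent_coords grid i j).reverse = pvPend grid (i, j) := by
  unfold adjacent_coords pvPend
  split_ifs <;> simp

-- branch equation for A's loop (the matches carry equation binders; the branch selected
-- by hrow/hch is extracted once here)
theorem pvLoopA_step (grid : List String) (b : PySem.Set (Int × Int)) (c : Int × Int)
    (rest : List (Int × Int)) (row : String) (ch : Char)
    (hmem : c ∉ b)
    (hrow : PySem.List.pyGet? grid c.1 = some row)
    (hch : PySem.Str.pyGet? row c.2 = some ch) :
    pvLoopA grid b (c :: rest) =
      if ch = '#' then pvLoopA grid b rest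
      else pvLoopA grid (PySem.Set.add b c)
        (((adjacent_coords grid c.1 c.2).filter
            (fun a => !(decide (a ∈ PySem.Set.add b c)))).reverse ++ rest) := by
  rw [pvLoopA, if_neg hmem]
  split
  · rename_i h; rw [h] at hrow; cases hrow
  · rename_i row2 hrow2
    rw [hrow2] at hrow
    injection hrow with e
    subst e
    split
    · rename_i h; rw [h] at hch; cases hch
    · rename_i ch2 hch2
      rw [hch2] at hch
      injection hch with e
      subst e
      rfl

-- A's loop equals a fold of the reference visit over the stack
theorem pvLoopA_eq (grid : List String)
    (hrect : ∀ r ∈ grid, r.toList.length = (grid.headD "").toList.length)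
    (f : Nat) :
    ∀ (b : PySem.Set (Int × Int)) (stack : List (Int × Int)),
      pvFree grid b < f → (∀ c ∈ stack, pvOK grid c) →
      pvLoopA grid b stack = stack.foldl (pvVisit grid f) b := by
  intro b stack
  induction b, stack using pvLoopA.induct grid with
  | case1 b => intro _ _; simp [pvLoopA]
  | case2 b c rest hmem ih =>
    intro hf hok
    rw [pvLoopA, if_pos hmem, List.foldl_cons, pvVisit_of_mem grid f b c hmem]
    exact ih hf (fun x hx => hok x (List.mem_cons_of_mem c hx))
  | case3 b c rest hmem hrow =>
    intro hf hok
    obtain ⟨row, ch, hrow', _, _⟩ := pvOK_get grid hrect c (hok c List.mem_cons_self)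
    rw [hrow'] at hrow
    cases hrow
  | case4 b c rest hmem row hrow hch =>
    intro hf hok
    obtain ⟨row', ch, hrow', hlen', hch'⟩ := pvOK_get grid hrect c (hok c List.mem_cons_self)
    rw [hrow'] at hrow
    injection hrow with e
    subst e
    rw [hch'] at hch
    cases hch
  | case5 b c rest hmem row hrow hch ih =>
    intro hf hok
    rw [pvLoopA_step grid b c rest row '#' hmem hrow hch, if_pos rfl,
      List.foldl_cons, pvVisit_wall grid f b c row hrow hch]
    exact ih hf (fun x hx => hok x (List.mem_cons_of_mem c hx))
  | case6 b c rest hmem row hrow ch hch hwall ih =>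
    intro hf hok
    have hfree : pvFree grid (PySem.Set.add b c) < pvFree grid b :=
      pvFree_add_lt grid b c row ch hrow hch hmem
    have hokpend : ∀ x ∈ pvPend grid c, pvOK grid x :=
      pvPend_ok grid hrect c (hok c List.mem_cons_self) row hrow
    rw [pvLoopA_step grid b c rest row ch hmem hrow hch, if_neg hwall]
    rw [ih (by omega) ?hok2]
    case hok2 =>
      intro x hx
      rcases List.mem_append.1 hx with hx | hx
      · refine hokpend x ?_
        rw [← List.filter_reverse, pvAdj_reverse] at hx
        exact List.mem_of_mem_filter hx
      · exact hok x (List.mem_cons_of_mem c hx)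
    rw [List.foldl_append, List.foldl_cons,
      pvVisit_step grid f b c row ch hmem hrow hch hwall hf]
    congr 1
    rw [← List.filter_reverse, pvAdj_reverse]
    exact pvFoldl_filter grid f (pvPend grid c) (PySem.Set.add b c) (PySem.Set.add b c)
      (fun x hx => hx)

theorem pvWall_caseA (grid : List String) (i j : Int) (row : String)
    (hrow : PySem.List.pyGet? grid i = some row)
    (hch : PySem.Str.pyGet? row j = some '#') :
    search_basin grid i j = [] := by
  have hch' : PySem.List.pyGet? row.toList j = some '#' := by simpa using hch
  rw [search_basin]
  simp [pvLoopA]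
  split
  · rfl
  · rename_i row2 hrow2
    split
    · rfl
    · rename_i ch hch2
      rw [hrow] at hrow2
      injection hrow2 with hr
      subst hr
      rw [hch'] at hch2
      injection hch2 with hc
      subst hc
      simp

-- ===== VERDICT (by name: the statement is the Claim_ definition above) =====
theorem search_basin_spec : Claim_equal_search_basin := by
  intro grid i j _ hpre
  unfold Spec_search_basin
  rw [search_basin_alt, pvFill_eq_visit]
  rcases hpre with hwall | ⟨hrect, h1, h2, h3, h4⟩
  · rcases h : PySem.List.pyGet? grid i with _ | row
    · rw [h] at hwall; simp at hwall
    · rw [h] at hwall; simp only [Option.bind_some] at hwall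
      rw [pvWall_caseA grid i j row h hwall,
        pvVisit_wall grid _ PySem.Set.empty (i, j) row h hwall]
      rfl
  · have hok : pvOK grid (i, j) := ⟨h1, h2, h3, h4⟩
    have hA := pvLoopA_eq grid hrect (pvFree grid PySem.Set.empty + 1) PySem.Set.empty [(i, j)]
      (by omega) (by intro c hc; simp at hc; subst hc; exact hok)
    rw [search_basin, hA]
    simp
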